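-- pv_equiv track=rewrite | github.com/henemm/gregor_zwanzig | src/formatters/sms_trip.py | _truncate_to_fit
-- ===== SOURCE A (Python) =====
-- def _truncate_to_fit(
--
--     segment_strs: list[str],
--     max_length: int
-- ) -> str:
--     """
--     Join segments and truncate to fit max_length.
--
--     Strategy:
--     1. Join all segments with " | "
--     2. If too long, remove last segment (oldest)
--     3. Repeat until fits or only 1 segment left
--     4. If 1 segment still too long, truncate with "..."
--
--     Args:
--         segment_strs: List of formatted segment strings
--         max_length: Maximum allowed length
--
--     Returns:
--         Truncated SMS text (≤max_length)
--
--     Raises: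
--         ValueError: If impossible to fit
--     """
--     working_segments = segment_strs.copy()
--
--     while working_segments:
--         sms = " | ".join(working_segments)
--
--         if len(sms) <= max_length:
--             return sms
--
--         if len(working_segments) == 1:
--             # Only 1 segment left, must truncate it
--             if max_length < 10:
--                 raise ValueError(
--                     f"Cannot fit segment in {max_length} chars"
--                 )
--             return sms[:max_length - 3] + "..."
--
--         # Remove oldest (last in list)
--         working_segments.pop()
--
--     raise ValueError("Cannot create SMS: no segments")
-- ===== SOURCE B (Python) =====
-- def _truncate_to_fit(
--     segment_strs: list[str],
--     max_length: int
-- ) -> str: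
--     # One left-to-right pass over prefix sums: k = largest prefix count whose
--     # " | "-join fits (join length is strictly increasing in the prefix count).
--     k = 0
--     total = -3  # join length of the first k segments = -3 + sum(len(s) + 3)
--     for s in segment_strs:
--         total += len(s) + 3
--         if total > max_length:
--             break
--         k += 1
--     if k >= 1:
--         return " | ".join(segment_strs[:k])
--     if not segment_strs:
--         raise ValueError("Cannot create SMS: no segments")
--     if max_length < 10:
--         raise ValueError(
--             f"Cannot fit segment in {max_length} chars"
--         )
--     return segment_strs[0][:max_length - 3] + "..."
-- ===== Notes on version B (the rewrite author's own statement) =====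
-- stated objective: faster
-- what changed: Instead of re-joining the shrinking list and re-measuring the joined text on every pop, B makes one pass over prefix sums of segment lengths to find the largest fitting segment count and joins once.
import Mathlib
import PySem

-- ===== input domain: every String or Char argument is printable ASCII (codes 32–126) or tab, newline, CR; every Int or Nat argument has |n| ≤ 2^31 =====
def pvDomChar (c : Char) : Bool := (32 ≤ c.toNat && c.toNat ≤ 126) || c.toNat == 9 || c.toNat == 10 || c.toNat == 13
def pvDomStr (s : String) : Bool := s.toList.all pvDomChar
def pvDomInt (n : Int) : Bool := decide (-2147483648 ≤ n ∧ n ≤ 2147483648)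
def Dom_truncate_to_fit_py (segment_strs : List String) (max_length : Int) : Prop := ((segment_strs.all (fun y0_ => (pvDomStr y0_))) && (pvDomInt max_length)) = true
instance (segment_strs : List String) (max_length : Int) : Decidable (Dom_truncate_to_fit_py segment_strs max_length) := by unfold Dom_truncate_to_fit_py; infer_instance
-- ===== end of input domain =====

-- B replaces A's quadratic re-join-and-measure pop loop by one pass over prefix
-- sums of segment lengths, then joins once (objective: faster, asymptotic).


-- ===== PORT A =====
-- the while-loop: working_segments shrinks from the right (pop) each iteration;
-- where Python raises ValueError the port returns "" (those inputs are outside Pre_).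
def tttLoopA (ws : List String) (max_length : Int) : String :=
  if _h : ws = [] then ""   -- loop exits: raise ValueError("Cannot create SMS: no segments")
  else
    let sms := PySem.Str.join " | " ws
    if PySem.Str.len sms ≤ max_length then sms
    else if ws.length = 1 then
      if max_length < 10 then ""   -- raise ValueError(f"Cannot fit segment in {max_length} chars")
      else PySem.Str.slice sms none (some (max_length - 3)) ++ "..."
    else tttLoopA ws.dropLast max_length
termination_by ws.length
decreasing_by
  simp only [List.length_dropLast]
  cases ws with
  | nil => simp_all
  | cons a t => simp

def truncate_to_fit_py (segment_strs : List String) (max_length : Int) : String :=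
  tttLoopA segment_strs max_length

-- ===== PORT B =====
-- the for-loop with break: counts leading segments while the running join length fits.
def tttScanB (xs : List String) (max_length : Int) (total : Int) : Nat :=
  match xs with
  | [] => 0
  | s :: rest =>
    let t := total + PySem.Str.len s + 3
    if t > max_length then 0 else 1 + tttScanB rest max_length t

def truncate_to_fit_py_alt (segment_strs : List String) (max_length : Int) : String :=
  let k := tttScanB segment_strs max_length (-3)
  if 1 ≤ k then PySem.Str.join " | " (segment_strs.take k)
  else
    match segment_strs with
    | [] => ""   -- raise ValueError("Cannot create SMS: no segments")
    | s :: _ =>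
      if max_length < 10 then ""   -- raise ValueError(f"Cannot fit segment in {max_length} chars")
      else PySem.Str.slice s none (some (max_length - 3)) ++ "..."

-- ===== PRECONDITION & SPEC =====
-- Pre_ excludes exactly the inputs where Python A raises ValueError: the empty list,
-- and max_length < 10 with a first segment longer than max_length.
def Pre_truncate_to_fit_py (segment_strs : List String) (max_length : Int) : Prop :=
  segment_strs ≠ [] ∧ (max_length < 10 → PySem.Str.len (segment_strs.headD "") ≤ max_length)
instance (segment_strs : List String) (max_length : Int) : Decidable (Pre_truncate_to_fit_py segment_strs max_length) := by unfold Pre_truncate_to_fit_py; infer_instance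

def pvWitness_truncate_to_fit_py : List String × Int := (["ab", "cd"], 7)

def Spec_truncate_to_fit_py (segment_strs : List String) (max_length : Int) (out : String) : Prop := out = truncate_to_fit_py_alt segment_strs max_length
instance (segment_strs : List String) (max_length : Int) (out : String) : Decidable (Spec_truncate_to_fit_py segment_strs max_length out) := by unfold Spec_truncate_to_fit_py; infer_instance

-- ===== CLAIM (what is proved, stated in full; the proofs are below) =====
def Claim_equal_truncate_to_fit_py : Prop := ∀ (segment_strs : List String) (max_length : Int), Dom_truncate_to_fit_py segment_strs max_length → Pre_truncate_to_fit_py segment_strs max_length → Spec_truncate_to_fit_py segment_strs max_length (truncate_to_fit_py segment_strs max_length)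

-- ===== LEMMAS AND PROOFS =====

-- total " | "-join cost of a list of segments: sum of (len + 3)
def tttCost (xs : List String) : Int := (xs.map (fun s => PySem.Str.len s + 3)).sum

theorem tttCost_nil : tttCost [] = 0 := rfl

theorem tttCost_cons (s : String) (rest : List String) :
    tttCost (s :: rest) = (PySem.Str.len s + 3) + tttCost rest := by
  simp [tttCost]

theorem tttCost_nonneg (xs : List String) : 0 ≤ tttCost xs := by
  induction xs with
  | nil => simp [tttCost]
  | cons s rest ih =>
    rw [tttCost_cons]
    have := PySem.Str.len_eq s
    omega


theorem tttScanB_cons (a : String) (l : List String) (M t : Int) :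
    tttScanB (a :: l) M t =
      if t + PySem.Str.len a + 3 > M then 0
      else 1 + tttScanB l M (t + PySem.Str.len a + 3) := rfl

theorem tttScanB_nil (M t : Int) : tttScanB [] M t = 0 := rfl

-- length of the " | "-join
theorem ttt_join_len (ws : List String) (h : ws ≠ []) :
    PySem.Str.len (PySem.Str.join " | " ws) = tttCost ws - 3 := by
  induction ws with
  | nil => simp at h
  | cons s rest ih =>
    cases rest with
    | nil =>
      simp [PySem.Str.len_eq, PySem.Str.toList_join, PySem.Chars.join_singleton,
        tttCost_cons, tttCost_nil]
    | cons q r =>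
      have ih' := ih (by simp)
      have hsep : (" | " : String).toList = [' ', '|', ' '] := rfl
      rw [PySem.Str.len_eq, PySem.Str.toList_join] at ih' ⊢
      rw [hsep] at ih' ⊢
      simp only [List.map_cons, PySem.Chars.join_cons_cons, List.length_append]
      simp only [List.map_cons] at ih'
      rw [tttCost_cons]
      have hl := PySem.Str.len_eq s
      have h3 : ([' ', '|', ' '] : List Char).length = 3 := rfl
      push_cast at ih' ⊢
      omega

theorem tttScanB_le_length (xs : List String) (M t : Int) :
    tttScanB xs M t ≤ xs.length := by
  induction xs generalizing t with
  | nil => simp [tttScanB]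
  | cons s rest ih =>
    simp only [tttScanB, List.length_cons]
    split
    · omega
    · have := ih (t + PySem.Str.len s + 3); omega

theorem tttScanB_eq_length_iff (xs : List String) (M t : Int) (h : xs ≠ []) :
    tttScanB xs M t = xs.length ↔ t + tttCost xs ≤ M := by
  induction xs generalizing t with
  | nil => simp at h
  | cons s rest ih =>
    rw [tttScanB_cons, List.length_cons, tttCost_cons]
    cases rest with
    | nil =>
      rw [tttScanB_nil, tttCost_nil, List.length_nil]
      constructor
      · intro hk; split at hk <;> omega
      · intro hle; rw [if_neg (by omega)]
    | cons q r =>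
      have hle := tttScanB_le_length (q :: r) M (t + PySem.Str.len s + 3)
      have hc := tttCost_nonneg (q :: r)
      constructor
      · intro hk
        split at hk
        · omega
        · have hr : tttScanB (q :: r) M (t + PySem.Str.len s + 3) = (q :: r).length := by
            omega
          have := (ih (t + PySem.Str.len s + 3) (by simp)).mp hr
          omega
      · intro hle2
        rw [if_neg (by omega)]
        have hr := (ih (t + PySem.Str.len s + 3) (by simp)).mpr (by omega)
        omega

theorem tttScanB_dropLast (xs : List String) (M t : Int)
    (h : tttScanB xs M t < xs.length) :
    tttScanB xs.dropLast M t = tttScanB xs M t := by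
  induction xs generalizing t with
  | nil => simp at h
  | cons s rest ih =>
    cases rest with
    | nil =>
      rw [List.dropLast_singleton, tttScanB_nil]
      rw [tttScanB_cons, List.length_cons, List.length_nil] at h
      rw [tttScanB_cons]
      split at h
      · rename_i hf; rw [if_pos hf]
      · rw [tttScanB_nil] at h; omega
    | cons q r =>
      have hdl : (s :: q :: r).dropLast = s :: (q :: r).dropLast := rfl
      rw [hdl, tttScanB_cons, tttScanB_cons]
      rw [tttScanB_cons, List.length_cons] at h
      split at h
      · rename_i hf; rw [if_pos hf, if_pos hf]
      · rename_i hf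
        rw [if_neg hf, if_neg hf]
        have hle := tttScanB_le_length (q :: r) M (t + PySem.Str.len s + 3)
        have hlt : tttScanB (q :: r) M (t + PySem.Str.len s + 3) < (q :: r).length := by
          omega
        rw [ih (t + PySem.Str.len s + 3) hlt]

-- core equivalence: A's pop loop equals B's single scan-and-join, for every input
theorem ttt_main (n : Nat) : ∀ (ws : List String) (M : Int), ws.length = n →
    tttLoopA ws M = truncate_to_fit_py_alt ws M := by
  induction n using Nat.strong_induction_on with
  | _ n ih =>
    intro ws M hn
    cases ws with
    | nil => simp [tttLoopA, truncate_to_fit_py_alt, tttScanB]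
    | cons s rest =>
      rw [tttLoopA]
      rw [dif_neg (List.cons_ne_nil s rest)]
      by_cases hfit : PySem.Str.len (PySem.Str.join " | " (s :: rest)) ≤ M
      · -- full join fits: scan returns the full length
        rw [if_pos hfit]
        have hk : tttScanB (s :: rest) M (-3) = (s :: rest).length := by
          rw [tttScanB_eq_length_iff _ _ _ (by simp)]
          have := ttt_join_len (s :: rest) (by simp)
          omega
        have h1 : 1 ≤ (s :: rest).length := by simp
        simp only [truncate_to_fit_py_alt, hk]
        rw [if_pos h1, List.take_length]
      · -- does not fit: scan < length
        have hklt : tttScanB (s :: rest) M (-3) < (s :: rest).length := by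
          have hle := tttScanB_le_length (s :: rest) M (-3)
          have hne : tttScanB (s :: rest) M (-3) ≠ (s :: rest).length := by
            intro hEq
            have := (tttScanB_eq_length_iff (s :: rest) M (-3) (by simp)).mp hEq
            have := ttt_join_len (s :: rest) (by simp)
            omega
          omega
        rw [if_neg hfit]
        cases rest with
        | nil =>
          -- single segment: both truncate (or both "raise", ported as "")
          have hjoin : PySem.Str.join " | " [s] = s := by
            rw [← String.toList_inj]
            simp [PySem.Str.toList_join, PySem.Chars.join_singleton]
          have hk0 : tttScanB [s] M (-3) = 0 := by
            simp only [List.length_cons, List.length_nil] at hklt; omega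
          simp only [List.length_cons, List.length_nil]
          simp [truncate_to_fit_py_alt, hk0, hjoin]
        | cons q r =>
          -- ≥ 2 segments: pop the last, apply IH, and show alt is unchanged
          have hlen2 : (s :: q :: r).length ≠ 1 := by simp
          rw [if_neg hlen2]
          have hdrop : (s :: q :: r).dropLast.length < n := by
            simp only [List.length_dropLast]
            simp only [List.length_cons] at hn ⊢
            omega
          rw [ih _ hdrop _ M rfl]
          have hdl : (s :: q :: r).dropLast = s :: (q :: r).dropLast := rfl
          have hkeq : tttScanB (s :: q :: r).dropLast M (-3) = tttScanB (s :: q :: r) M (-3) :=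
            tttScanB_dropLast _ _ _ hklt
          simp only [truncate_to_fit_py_alt, hkeq]
          by_cases hk1 : 1 ≤ tttScanB (s :: q :: r) M (-3)
          · -- join of the same prefix on both sides
            have htake : (s :: q :: r).dropLast.take (tttScanB (s :: q :: r) M (-3)) =
                (s :: q :: r).take (tttScanB (s :: q :: r) M (-3)) := by
              rw [List.dropLast_eq_take, List.take_take]
              congr 1
              simp only [List.length_cons] at hklt ⊢
              omega
            rw [if_pos hk1, if_pos hk1, htake]
          · -- fallback on the same head on both sides
            rw [if_neg hk1, if_neg hk1, hdl]

-- ===== VERDICT (by name: the statement is the Claim_ definition above) =====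
theorem truncate_to_fit_py_spec : Claim_equal_truncate_to_fit_py := by
  intro segment_strs max_length _hdom _hpre
  unfold Spec_truncate_to_fit_py truncate_to_fit_py
  exact ttt_main segment_strs.length segment_strs max_length rfl
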